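-- pv_equiv track=rewrite | github.com/GLEECBTC/komodo-docs-mdx | utils/py/generate_postman.py | _filter_electrum_servers
-- ===== SOURCE A (Python) =====
-- from typing import Dict, List, Set, Any, Optional, Tuple
--
-- def _filter_electrum_servers(servers: List[Dict], environment: str) -> List[Dict]:
--     """Filter electrum servers based on environment protocol preferences."""
--     if environment == 'wasm':
--         # WASM only supports WSS
--         return [s for s in servers if s.get('protocol') == 'WSS']
--     elif environment == 'native':
--         # Native prefers TCP and SSL, but can use WSS
--         preferred_order = ['TCP', 'SSL', 'WSS']
--         sorted_servers = []
--         for protocol in preferred_order: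
--             sorted_servers.extend([s for s in servers if s.get('protocol') == protocol])
--         return sorted_servers[:3]  # Limit to 3 servers
--     else:
--         return servers
-- ===== SOURCE B (Python) =====
-- def _filter_electrum_servers(servers, environment):
--     """Filter electrum servers based on environment protocol preferences."""
--     if environment == 'wasm':
--         return [s for s in servers if s.get('protocol') == 'WSS']
--     if environment == 'native':
--         tcp, ssl, wss = [], [], []
--         for s in servers:
--             p = s.get('protocol')
--             if p == 'TCP':
--                 tcp.append(s)
--             elif p == 'SSL':
--                 ssl.append(s)
--             elif p == 'WSS':
--                 wss.append(s)
--         return (tcp + ssl + wss)[:3]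
--     return servers
-- ===== Notes on version B (the rewrite author's own statement) =====
-- stated objective: alternative
-- what changed: The 'native' branch makes a single bucketing pass over servers (three accumulator lists filled in one loop) instead of three separate full scans, then concatenates the buckets and takes the first three.
import Mathlib
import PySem

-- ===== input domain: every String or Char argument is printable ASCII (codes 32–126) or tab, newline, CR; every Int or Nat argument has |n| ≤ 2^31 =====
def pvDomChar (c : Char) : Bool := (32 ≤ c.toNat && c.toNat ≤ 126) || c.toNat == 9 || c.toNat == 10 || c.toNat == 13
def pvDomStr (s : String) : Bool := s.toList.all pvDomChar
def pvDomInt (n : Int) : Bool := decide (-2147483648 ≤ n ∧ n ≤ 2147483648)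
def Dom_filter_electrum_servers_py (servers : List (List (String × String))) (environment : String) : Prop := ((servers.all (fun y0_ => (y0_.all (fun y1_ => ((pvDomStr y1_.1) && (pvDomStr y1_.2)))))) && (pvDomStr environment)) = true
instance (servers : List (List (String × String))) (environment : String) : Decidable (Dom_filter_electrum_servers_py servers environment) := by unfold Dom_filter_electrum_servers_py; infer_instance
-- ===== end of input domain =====

-- B is the same function with the 'native' branch done as ONE bucketing pass (three
-- accumulator lists filled in a single loop) instead of three separate scans; return value only.

-- ===== PORT A =====
-- s.get('protocol') on the association list (first match, none if absent)
def pvGetProto (s : List (String × String)) : Option String :=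
  (PySem.Dict.mk s).get? "protocol"

def filter_electrum_servers_py (servers : List (List (String × String))) (environment : String) : List (List (String × String)) :=
  if environment == "wasm" then
    servers.filter (fun s => pvGetProto s == some "WSS")
  else if environment == "native" then
    let sorted_servers :=
      ["TCP", "SSL", "WSS"].foldl
        (fun acc protocol => acc ++ servers.filter (fun s => pvGetProto s == some protocol)) []
    PySem.List.slice sorted_servers none (some 3)   -- sorted_servers[:3]
  else
    servers

-- ===== PORT B =====
-- one pass: (tcp, ssl, wss) buckets
def pvBucketStep (st : List (List (String × String)) × List (List (String × String)) × List (List (String × String)))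
    (s : List (String × String)) :
    List (List (String × String)) × List (List (String × String)) × List (List (String × String)) :=
  let p := pvGetProto s
  if p == some "TCP" then (st.1 ++ [s], st.2.1, st.2.2)
  else if p == some "SSL" then (st.1, st.2.1 ++ [s], st.2.2)
  else if p == some "WSS" then (st.1, st.2.1, st.2.2 ++ [s])
  else st

def filter_electrum_servers_py_alt (servers : List (List (String × String))) (environment : String) : List (List (String × String)) :=
  if environment == "wasm" then
    servers.filter (fun s => pvGetProto s == some "WSS")
  else if environment == "native" then
    let st := servers.foldl pvBucketStep ([], [], [])
    (st.1 ++ st.2.1 ++ st.2.2).take 3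
  else
    servers

-- ===== PRECONDITION & SPEC =====
def Spec_filter_electrum_servers_py (servers : List (List (String × String))) (environment : String) (out : List (List (String × String))) : Prop := out = filter_electrum_servers_py_alt servers environment
instance (servers : List (List (String × String))) (environment : String) (out : List (List (String × String))) : Decidable (Spec_filter_electrum_servers_py servers environment out) := by unfold Spec_filter_electrum_servers_py; infer_instance

-- ===== CLAIM (what is proved, stated in full; the proofs are below) =====
def Claim_equal_filter_electrum_servers_py : Prop := ∀ (servers : List (List (String × String))) (environment : String), Dom_filter_electrum_servers_py servers environment → Spec_filter_electrum_servers_py servers environment (filter_electrum_servers_py servers environment)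

-- ===== LEMMAS AND PROOFS =====

-- the bucketing fold produces exactly the three protocol filters (appended to the seeds)
theorem pvBucket_eq (l : List (List (String × String)))
    (t s w : List (List (String × String))) :
    l.foldl pvBucketStep (t, s, w) =
      (t ++ l.filter (fun x => pvGetProto x == some "TCP"),
       s ++ l.filter (fun x => pvGetProto x == some "SSL"),
       w ++ l.filter (fun x => pvGetProto x == some "WSS")) := by
  induction l generalizing t s w with
  | nil => simp
  | cons h tl ih =>
    simp only [List.foldl_cons, pvBucketStep, List.filter_cons]
    by_cases h1 : pvGetProto h = some "TCP"
    · simp [h1, ih]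
    · by_cases h2 : pvGetProto h = some "SSL"
      · simp [h1, h2, ih]
      · by_cases h3 : pvGetProto h = some "WSS"
        · simp [h1, h2, h3, ih]
        · simp [h1, h2, h3, ih]

-- ===== VERDICT (by name: the statement is the Claim_ definition above) =====
theorem filter_electrum_servers_py_spec : Claim_equal_filter_electrum_servers_py := by
  intro servers environment _
  unfold Spec_filter_electrum_servers_py filter_electrum_servers_py filter_electrum_servers_py_alt
  by_cases hw : environment == "wasm"
  · simp [hw]
  · by_cases hn : environment == "native"
    · simp only [hw, hn, if_true, if_false, Bool.false_eq_true]
      rw [pvBucket_eq, show ((3:Int)) = ((3:Nat):Int) by norm_num, PySem.List.slice_to_natCast]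
      simp
    · simp [hw, hn]
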